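-- pv_equiv track=rewrite | github.com/catlee/adventofcode | 2019/python/25/25.py | find_items
-- ===== SOURCE A (Python) =====
-- def find_items(s):
--     rv = set()
--     looking = False
--     for line in s.split("\n"):
--         if not line.strip():
--             looking = False
--         elif looking:
--             item = line[2:].strip()
--             rv.add(item)
--         elif line.startswith("Items here:"):
--             looking = True
--
--     return rv
-- ===== SOURCE B (Python) =====
-- def _add_block_items(rv, block):
--     # add every line after the FIRST "Items here:" header in this block
--     for i, line in enumerate(block):
--         if line.startswith("Items here:"):
--             for rest in block[i + 1:]:
--                 rv.add(rest[2:].strip())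
--             return
--
--
-- def find_items(s):
--     # split into blocks of consecutive non-blank lines, then scan each block
--     blocks = []
--     cur = []
--     for line in s.split("\n"):
--         if not line.strip():
--             blocks.append(cur)
--             cur = []
--         else:
--             cur.append(line)
--     blocks.append(cur)
--
--     rv = set()
--     for block in blocks:
--         _add_block_items(rv, block)
--     return rv
-- ===== Notes on version B (the rewrite author's own statement) =====
-- stated objective: alternative
-- what changed: Replaces A's single-pass toggle-flag loop with a segment-first decomposition: split the lines into blank-separated blocks, then within each block find the first header line and add every later line of that block.
import Mathlib
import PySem

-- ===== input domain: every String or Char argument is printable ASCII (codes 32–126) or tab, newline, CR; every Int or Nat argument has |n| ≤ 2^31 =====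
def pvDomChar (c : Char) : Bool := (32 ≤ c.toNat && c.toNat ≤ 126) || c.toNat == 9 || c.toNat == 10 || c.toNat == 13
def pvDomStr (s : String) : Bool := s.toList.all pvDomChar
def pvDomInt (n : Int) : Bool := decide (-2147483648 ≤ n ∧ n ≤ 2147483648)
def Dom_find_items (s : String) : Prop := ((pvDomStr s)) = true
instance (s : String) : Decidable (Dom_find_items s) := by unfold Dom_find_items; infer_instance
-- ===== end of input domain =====

-- B parses items by first splitting the text into blank-line-separated blocks and then
-- scanning each block for the first "Items here:" header (alternative decomposition of
-- A's single-pass toggle-flag loop); return value equivalence only.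


-- shared tiny primitives (transliterations of `not line.strip()`, `line.startswith("Items here:")`,
-- `line[2:].strip()`), used by both ports
def pvBlank (line : String) : Bool := PySem.Str.strip line == ""
def pvHdr (line : String) : Bool := PySem.Str.startswith line "Items here:"
def pvItem (line : String) : String := PySem.Str.strip (PySem.Str.slice line (some 2) none)

-- ===== PORT A =====
-- A's loop step: state = (rv, looking)
def pvStepA (st : PySem.Set String × Bool) (line : String) : PySem.Set String × Bool :=
  if pvBlank line then (st.1, false)
  else if st.2 then (PySem.Set.add st.1 (pvItem line), true)
  else if pvHdr line then (st.1, true)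
  else st

def find_items (s : String) : List String :=
  (((PySem.Str.split? s "\n").getD []).foldl pvStepA (PySem.Set.empty, false)).1

-- ===== PORT B =====
-- `_add_block_items`: walk the block until the first header, then add every remaining line
def pvAddBlockItems (rv : PySem.Set String) : List String → PySem.Set String
  | [] => rv
  | line :: rest =>
    if pvHdr line then rest.foldl (fun r x => PySem.Set.add r (pvItem x)) rv
    else pvAddBlockItems rv rest

-- block-building loop step: state = (blocks, cur)
def pvBlocksStep (st : List (List String) × List String) (line : String) :
    List (List String) × List String :=
  if pvBlank line then (st.1 ++ [st.2], []) else (st.1, st.2 ++ [line])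

def pvBlocks (lines : List String) : List (List String) :=
  let p := lines.foldl pvBlocksStep ([], [])
  p.1 ++ [p.2]

def find_items_alt (s : String) : List String :=
  (pvBlocks ((PySem.Str.split? s "\n").getD [])).foldl pvAddBlockItems PySem.Set.empty

-- ===== PRECONDITION & SPEC =====
def Spec_find_items (s : String) (out : List String) : Prop := out = find_items_alt s
instance (s : String) (out : List String) : Decidable (Spec_find_items s out) := by unfold Spec_find_items; infer_instance

-- ===== CLAIM (what is proved, stated in full; the proofs are below) =====
def Claim_equal_find_items : Prop := ∀ (s : String), Dom_find_items s → Spec_find_items s (find_items s)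

-- ===== LEMMAS AND PROOFS =====

-- the blocks accumulator only grows: peel it off the fold
theorem pvBlocks_foldl_acc (ls : List String) (acc : List (List String)) (cur : List String) :
    ls.foldl pvBlocksStep (acc, cur) =
      (acc ++ (ls.foldl pvBlocksStep ([], cur)).1, (ls.foldl pvBlocksStep ([], cur)).2) := by
  induction ls generalizing acc cur with
  | nil => simp
  | cons l ls ih =>
    simp only [List.foldl, pvBlocksStep]
    by_cases h : pvBlank l = true
    · simp only [h, if_pos]
      rw [ih (acc ++ [cur]) []]
      simp only [List.nil_append]
      rw [ih [cur] []]
      simp only [List.append_assoc]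
    · simp only [Bool.not_eq_true] at h
      simp only [h, Bool.false_eq_true, if_false]
      exact ih acc (cur ++ [l])

-- a block with no header contributes nothing
theorem pvAdd_no_hdr (cur : List String) (rv : PySem.Set String)
    (h : cur.any pvHdr = false) : pvAddBlockItems rv cur = rv := by
  induction cur with
  | nil => rfl
  | cons c cs ih =>
    simp only [List.any_cons, Bool.or_eq_false_iff] at h
    simp only [pvAddBlockItems, h.1, Bool.false_eq_true, if_false]
    exact ih h.2

-- appending one line to a block that already contains a header adds exactly its item
theorem pvAdd_snoc_any (cur : List String) (rv : PySem.Set String) (l : String)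
    (h : cur.any pvHdr = true) :
    pvAddBlockItems rv (cur ++ [l]) = PySem.Set.add (pvAddBlockItems rv cur) (pvItem l) := by
  induction cur generalizing rv with
  | nil => simp at h
  | cons c cs ih =>
    by_cases hc : pvHdr c = true
    · simp only [List.cons_append, pvAddBlockItems, hc, if_pos, List.foldl_append, List.foldl]
    · simp only [List.any_cons, hc, Bool.false_or] at h
      simp only [List.cons_append, pvAddBlockItems, hc, Bool.false_eq_true, if_false]
      exact ih rv h

-- appending one line to a header-free block still contributes nothing
theorem pvAdd_snoc_none (cur : List String) (rv : PySem.Set String) (l : String)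
    (h : cur.any pvHdr = false) : pvAddBlockItems rv (cur ++ [l]) = rv := by
  induction cur with
  | nil =>
    simp only [List.nil_append, pvAddBlockItems]
    split <;> rfl
  | cons c cs ih =>
    simp only [List.any_cons, Bool.or_eq_false_iff] at h
    simp only [List.cons_append, pvAddBlockItems, h.1, Bool.false_eq_true, if_false]
    exact ih h.2

-- main invariant: processing the remaining lines block-wise, starting mid-block with `cur`,
-- matches A's fold started from the state (items of cur so far, cur contains a header)
theorem pv_main (ls cur : List String) (rv : PySem.Set String) :
    ((ls.foldl pvBlocksStep ([], cur)).1 ++ [(ls.foldl pvBlocksStep ([], cur)).2]).foldl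
        pvAddBlockItems rv =
      (ls.foldl pvStepA (pvAddBlockItems rv cur, cur.any pvHdr)).1 := by
  induction ls generalizing cur rv with
  | nil => simp [List.foldl]
  | cons l ls ih =>
    simp only [List.foldl]
    by_cases hb : pvBlank l = true
    · -- blank line: flush the current block
      simp only [pvBlocksStep, pvStepA, hb, if_pos]
      simp only [List.nil_append]
      rw [pvBlocks_foldl_acc ls [cur] []]
      simp only [List.append_assoc, List.foldl_append, List.foldl]
      have := ih [] (pvAddBlockItems rv cur)
      simpa [pvAddBlockItems] using this
    · simp only [pvBlocksStep, pvStepA, hb, Bool.false_eq_true, if_false]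
      rw [ih (cur ++ [l]) rv]
      by_cases ha : cur.any pvHdr = true
      · simp only [ha, if_pos, pvAdd_snoc_any cur rv l ha]
        simp [List.any_append, ha]
      · simp only [Bool.not_eq_true] at ha
        simp only [ha, Bool.false_eq_true, if_false, pvAdd_no_hdr cur rv ha,
          pvAdd_snoc_none cur rv l ha]
        by_cases hh : pvHdr l = true
        · simp [hh, List.any_append, List.any_cons]
        · simp only [Bool.not_eq_true] at hh
          simp [hh, List.any_append, List.any_cons, ha]

-- ===== VERDICT (by name: the statement is the Claim_ definition above) =====
theorem find_items_spec : Claim_equal_find_items := by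
  intro s _
  unfold Spec_find_items find_items find_items_alt pvBlocks
  rw [pv_main ((PySem.Str.split? s "\n").getD []) [] PySem.Set.empty]
  rfl
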